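-- pv_equiv track=rewrite | github.com/hahalaugh/LeetCode | 78_Subsets.py | subsetsBC
-- ===== SOURCE A (Python) =====
-- def subsetsBC(nums):
--     """
--     :type nums: List[int]
--     :rtype: List[List[int]]
--     """
--     #BCģ��
--     result = [[]]
--
--     def bc(cur, idx, k):
--         if len(cur) == k:
--             result.append(cur[:])
--         else:
--             for i in range(idx, len(nums)):
--                 cur.append(nums[i])
--                 bc(cur, i+1, k)
--                 cur.pop()
--
--     for k in range(1, len(nums)+1):
--         bc([], 0, k)
--
--     return result
-- ===== SOURCE B (Python) =====
-- from itertools import combinations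
--
-- def subsetsBC(nums):
--     result = []
--     for k in range(len(nums) + 1):
--         for combo in combinations(nums, k):
--             result.append(list(combo))
--     return result
-- ===== Notes on version B (the rewrite author's own statement) =====
-- stated objective: simpler
-- what changed: Replaces the mutable-cur backtracking recursion (and the [[]] seed) with a flat double loop over sizes k=0..n using itertools.combinations, which yields the same index-lexicographic order including the empty subset at k=0.
import Mathlib
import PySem

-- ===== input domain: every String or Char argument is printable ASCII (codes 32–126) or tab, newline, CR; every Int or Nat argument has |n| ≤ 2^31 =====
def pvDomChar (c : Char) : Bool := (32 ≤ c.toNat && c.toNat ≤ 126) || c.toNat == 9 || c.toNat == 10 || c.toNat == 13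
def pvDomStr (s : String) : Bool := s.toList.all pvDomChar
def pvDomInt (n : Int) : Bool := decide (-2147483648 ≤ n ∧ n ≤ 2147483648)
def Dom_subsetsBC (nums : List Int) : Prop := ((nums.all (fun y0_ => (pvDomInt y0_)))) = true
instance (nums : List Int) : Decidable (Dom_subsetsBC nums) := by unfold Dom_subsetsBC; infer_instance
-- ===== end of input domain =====

-- B replaces A's mutable-cur backtracking recursion with a flat per-size enumeration of
-- combinations (same values, same order); objective: simpler.

-- ===== PORT A =====
-- A's inner `bc(cur, idx, k)` walks indices idx..len(nums)-1; the index idx is represented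
-- here by the suffix `rest = nums[idx:]` (the same elements visited in the same order).
-- `cur.append(x); bc(...); cur.pop()` becomes passing `cur ++ [x]` to the recursive call.
mutual
def bcA (rest cur : List Int) (k : Nat) (result : List (List Int)) : List (List Int) :=
  if cur.length = k then result ++ [cur]
  else bcLoop rest cur k result
termination_by (rest.length, 1)
decreasing_by simp [Prod.lex_def]

def bcLoop (rest cur : List Int) (k : Nat) (result : List (List Int)) : List (List Int) :=
  match rest with
  | [] => result
  | x :: xs => bcLoop xs cur k (bcA xs (cur ++ [x]) k result)
termination_by (rest.length, 0)
decreasing_by all_goals simp [Prod.lex_def]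
end

def subsetsBC (nums : List Int) : List (List Int) :=
  (List.range' 1 nums.length).foldl (fun result k => bcA nums [] k result) [[]]

-- ===== PORT B =====
-- transliteration of itertools.combinations(nums, k) in its documented index-lexicographic order
def combos : Nat → List Int → List (List Int)
  | 0, _ => [[]]
  | _ + 1, [] => []
  | k + 1, x :: xs => ((combos k xs).map (fun c => x :: c)) ++ combos (k + 1) xs

def subsetsBC_alt (nums : List Int) : List (List Int) :=
  (List.range (nums.length + 1)).flatMap (fun k => combos k nums)

-- ===== PRECONDITION & SPEC =====
def Spec_subsetsBC (nums : List Int) (out : List (List Int)) : Prop := out = subsetsBC_alt nums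
instance (nums : List Int) (out : List (List Int)) : Decidable (Spec_subsetsBC nums out) := by unfold Spec_subsetsBC; infer_instance

-- ===== CLAIM (what is proved, stated in full; the proofs are below) =====
def Claim_equal_subsetsBC : Prop := ∀ (nums : List Int), Dom_subsetsBC nums → Spec_subsetsBC nums (subsetsBC nums)

-- ===== LEMMAS AND PROOFS =====

-- One backtracking call starting from partial choice `cur` contributes exactly the
-- combinations of the missing `k - cur.length` elements drawn from `rest`, prefixed by `cur`.
theorem bcA_eq (rest : List Int) :
    ∀ (cur : List Int) (k : Nat) (result : List (List Int)),
      (cur.length ≤ k →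
        bcA rest cur k result = result ++ (combos (k - cur.length) rest).map (fun c => cur ++ c)) ∧
      (cur.length < k →
        bcLoop rest cur k result = result ++ (combos (k - cur.length) rest).map (fun c => cur ++ c)) := by
  induction rest with
  | nil =>
    intro cur k result
    constructor
    · intro hle
      rw [bcA, bcLoop]
      by_cases h : cur.length = k
      · simp [h, combos]
      · have : ∃ m, k - cur.length = m + 1 := ⟨k - cur.length - 1, by omega⟩
        obtain ⟨m, hm⟩ := this
        simp [h, hm, combos]
    · intro hlt
      have : ∃ m, k - cur.length = m + 1 := ⟨k - cur.length - 1, by omega⟩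
      obtain ⟨m, hm⟩ := this
      simp [bcLoop, hm, combos]
  | cons x xs ih =>
    intro cur k result
    have loopCase : cur.length < k →
        bcLoop (x :: xs) cur k result
          = result ++ (combos (k - cur.length) (x :: xs)).map (fun c => cur ++ c) := by
      intro hlt
      rw [bcLoop]
      have h1 : (cur ++ [x]).length ≤ k := by simp; omega
      rw [(ih (cur ++ [x]) k result).1 h1]
      rw [(ih cur k _).2 hlt]
      have : ∃ m, k - cur.length = m + 1 := ⟨k - cur.length - 1, by omega⟩
      obtain ⟨m, hm⟩ := this
      have hm' : k - (cur ++ [x]).length = m := by simp; omega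
      rw [hm, hm', combos]
      simp [List.map_append, List.append_assoc]
    constructor
    · intro hle
      rw [bcA]
      by_cases h : cur.length = k
      · simp [h, combos]
      · have hlt : cur.length < k := by omega
        simp only [h, if_false]
        exact loopCase hlt
    · exact loopCase

-- Each top-level iteration `bc([], 0, k)` appends exactly combos k nums to the accumulator.
theorem fold_bcA_eq (ks : List Nat) (nums : List Int) :
    ∀ acc, ks.foldl (fun result k => bcA nums [] k result) acc
      = acc ++ ks.flatMap (fun k => combos k nums) := by
  induction ks with
  | nil => intro acc; simp
  | cons k ks ih =>
    intro acc
    simp only [List.foldl_cons, List.flatMap_cons]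
    rw [ih, (bcA_eq nums [] k acc).1 (Nat.zero_le k)]
    simp [List.append_assoc]

-- ===== VERDICT (by name: the statement is the Claim_ definition above) =====
theorem subsetsBC_spec : Claim_equal_subsetsBC := by
  intro nums _
  unfold Spec_subsetsBC subsetsBC subsetsBC_alt
  rw [fold_bcA_eq]
  rw [List.range_eq_range', show nums.length + 1 = 1 + nums.length by omega,
      ← List.range'_append (s := 0) (m := 1) (n := nums.length) (step := 1)]
  simp [combos]
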